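-- pv_equiv track=rewrite | github.com/klknet/geeks4geeks | datastructure/array/rearrange.py | double_and_move
-- ===== SOURCE A (Python) =====
-- def double_and_move(arr):
--     """
--     Double the first element equals to next element and move zeros to end.
--     :param arr:
--     :return:
--     """
--     for i in range(len(arr) - 1):
--         if arr[i + 1] != 0 and arr[i] == arr[i + 1]:
--             arr[i] <<= 1
--             arr[i + 1] = 0
--     count = 0
--     for i in range(len(arr)):
--         if arr[i] != 0:
--             arr[count], arr[i] = arr[i], arr[count]
--             count += 1
--     return arr
-- ===== SOURCE B (Python) =====
-- def double_and_move(arr):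
--     """Single fused pass: double equal adjacent pairs via a pending element
--     while collecting nonzeros, then pad with zeros (mutates arr in place)."""
--     nonzeros = []
--     pending = None
--     for x in arr:
--         if pending is not None and pending == x and x != 0:
--             nonzeros.append(pending << 1)
--             pending = 0
--         else:
--             if pending is not None and pending != 0:
--                 nonzeros.append(pending)
--             pending = x
--     if pending is not None and pending != 0:
--         nonzeros.append(pending)
--     arr[:] = nonzeros + [0] * (len(arr) - len(nonzeros))
--     return arr
-- ===== Notes on version B (the rewrite author's own statement) =====
-- stated objective: alternative
-- what changed: Replaces A's two index-based in-place passes (adjacent doubling by index, then a swap-based two-pointer zero partition) with a single fused value pass keeping a pending element and collecting nonzeros, then padding with zeros and writing back via slice assignment.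
import Mathlib
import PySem

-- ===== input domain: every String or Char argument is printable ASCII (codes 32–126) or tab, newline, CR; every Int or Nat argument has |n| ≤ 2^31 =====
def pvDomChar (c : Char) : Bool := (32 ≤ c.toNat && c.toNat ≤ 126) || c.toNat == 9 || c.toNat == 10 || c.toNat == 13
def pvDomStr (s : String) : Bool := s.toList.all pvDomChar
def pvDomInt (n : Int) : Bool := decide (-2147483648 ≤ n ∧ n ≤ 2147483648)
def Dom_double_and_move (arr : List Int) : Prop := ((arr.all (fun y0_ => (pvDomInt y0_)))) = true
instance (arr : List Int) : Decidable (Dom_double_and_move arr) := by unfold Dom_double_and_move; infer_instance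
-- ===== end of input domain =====

-- B replaces A's two index/swap passes with one fused value pass plus zero padding; equivalence is about the RETURN value (both Pythons also mutate arr to that same value).
-- ===== PORT A =====
-- first loop body: arr[i] <<= 1 is arr[i] = arr[i] * 2 on ints; indices from range are always in range, so getD is exact
def stepA1 (a : List Int) (i : Nat) : List Int :=
  if a.getD (i+1) 0 ≠ 0 ∧ a.getD i 0 = a.getD (i+1) 0 then
    (a.set i (2 * a.getD i 0)).set (i+1) 0
  else a

-- second loop body: the simultaneous swap reads both cells before writing
def stepA2 (s : List Int × Nat) (i : Nat) : List Int × Nat :=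
  if s.1.getD i 0 ≠ 0 then
    let vi := s.1.getD i 0
    let vc := s.1.getD s.2 0
    ((s.1.set s.2 vi).set i vc, s.2 + 1)
  else s

def double_and_move (arr : List Int) : List Int :=
  let a1 := (List.range (arr.length - 1)).foldl stepA1 arr
  ((List.range a1.length).foldl stepA2 (a1, 0)).1

-- ===== PORT B =====
-- loop body of Source B: state = (nonzeros, pending)
def stepB (s : List Int × Option Int) (x : Int) : List Int × Option Int :=
  match s.2 with
  | some p =>
    if p = x ∧ x ≠ 0 then (s.1 ++ [2 * p], some 0)
    else if p ≠ 0 then (s.1 ++ [p], some x)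
    else (s.1, some x)
  | none => (s.1, some x)

def double_and_move_alt (arr : List Int) : List Int :=
  let s := arr.foldl stepB ([], none)
  let nz := match s.2 with
    | some p => if p ≠ 0 then s.1 ++ [p] else s.1
    | none => s.1
  nz ++ List.replicate (arr.length - nz.length) 0

-- ===== PRECONDITION & SPEC =====
def Spec_double_and_move (arr : List Int) (out : List Int) : Prop := out = double_and_move_alt arr
instance (arr : List Int) (out : List Int) : Decidable (Spec_double_and_move arr out) := by unfold Spec_double_and_move; infer_instance

-- ===== CLAIM (what is proved, stated in full; the proofs are below) =====
def Claim_equal_double_and_move : Prop := ∀ (arr : List Int), Dom_double_and_move arr → Spec_double_and_move arr (double_and_move arr)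

-- ===== LEMMAS AND PROOFS =====

-- the common specification: the doubling pass, written recursively
def dbl : List Int → List Int
  | [] => []
  | [x] => [x]
  | x :: y :: rest => if y ≠ 0 ∧ x = y then (2 * x) :: dbl (0 :: rest) else x :: dbl (y :: rest)
termination_by l => l.length
decreasing_by all_goals simp

lemma dbl_length : ∀ l : List Int, (dbl l).length = l.length := by
  intro l
  induction l using dbl.induct <;> simp [dbl, *]

lemma getD_at (pre : List Int) (x : Int) (t : List Int) :
    (pre ++ x :: t).getD pre.length 0 = x := by
  induction pre with
  | nil => rfl
  | cons a pre ih => simpa using ih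

lemma set_at (pre : List Int) (x v : Int) (t : List Int) :
    (pre ++ x :: t).set pre.length v = pre ++ v :: t := by
  induction pre with
  | nil => rfl
  | cons a pre ih => simpa using ih

lemma loop1 : ∀ (suf pre : List Int),
    (List.range' pre.length (suf.length - 1)).foldl stepA1 (pre ++ suf) = pre ++ dbl suf := by
  intro suf
  induction suf using dbl.induct with
  | case1 => intro pre; simp [dbl]
  | case2 x => intro pre; simp [dbl]
  | case3 x y rest h ih =>
    intro pre
    obtain ⟨hy, hxy⟩ := h
    have h1 : (pre ++ x :: y :: rest).getD pre.length 0 = x := getD_at pre x _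
    have h2 : (pre ++ x :: y :: rest).getD (pre.length + 1) 0 = y := by
      have := getD_at (pre ++ [x]) y rest; simpa using this
    have hset : ((pre ++ x :: y :: rest).set pre.length (2 * x)).set (pre.length + 1) 0
        = (pre ++ [2 * x]) ++ 0 :: rest := by
      rw [set_at]
      have := set_at (pre ++ [2 * x]) y 0 rest
      simpa using this
    have : (List.range' pre.length ((x :: y :: rest).length - 1)).foldl stepA1 (pre ++ x :: y :: rest)
        = (List.range' (pre.length + 1) ((0 :: rest).length - 1)).foldl stepA1 ((pre ++ [2 * x]) ++ 0 :: rest) := by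
      simp only [List.length_cons, Nat.add_sub_cancel, List.range'_succ, List.foldl_cons]
      rw [show stepA1 (pre ++ x :: y :: rest) pre.length = (pre ++ [2 * x]) ++ 0 :: rest by
        simp [stepA1, h1, h2, hy, hxy, hset]]
    rw [this]
    have h3 := ih (pre ++ [2 * x])
    simp only [List.length_append, List.length_cons, List.length_nil, Nat.add_sub_cancel,
      Nat.zero_add] at h3 ⊢
    rw [h3]
    simp [dbl, hy, hxy]
  | case4 x y rest h ih =>
    intro pre
    have h1 : (pre ++ x :: y :: rest).getD pre.length 0 = x := getD_at pre x _
    have h2 : (pre ++ x :: y :: rest).getD (pre.length + 1) 0 = y := by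
      have := getD_at (pre ++ [x]) y rest; simpa using this
    have : (List.range' pre.length ((x :: y :: rest).length - 1)).foldl stepA1 (pre ++ x :: y :: rest)
        = (List.range' (pre.length + 1) ((y :: rest).length - 1)).foldl stepA1 ((pre ++ [x]) ++ y :: rest) := by
      simp only [List.length_cons, Nat.add_sub_cancel, List.range'_succ, List.foldl_cons]
      rw [show stepA1 (pre ++ x :: y :: rest) pre.length = (pre ++ [x]) ++ y :: rest by
        simp only [stepA1, h1, h2]
        rw [if_neg h]
        simp]
    rw [this]
    have h3 := ih (pre ++ [x])
    simp only [List.length_append, List.length_cons, List.length_nil, Nat.add_sub_cancel,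
      Nat.zero_add] at h3 ⊢
    rw [h3]
    have hd : dbl (x :: y :: rest) = x :: dbl (y :: rest) := by
      simp only [dbl]; rw [if_neg h]
    simp [hd]

lemma replicate_snoc (n : Nat) (l : List Int) :
    List.replicate n (0 : Int) ++ (0 : Int) :: l = List.replicate (n + 1) 0 ++ l := by
  induction n with
  | zero => rfl
  | succ k ih => simpa [List.replicate_succ] using ih

lemma loop2 : ∀ (suf nz : List Int) (z : Nat),
    ((List.range' (nz.length + z) suf.length).foldl stepA2
        (nz ++ List.replicate z 0 ++ suf, nz.length)).1
      = nz ++ suf.filter (· ≠ 0) ++ List.replicate (z + suf.countP (· = 0)) 0 := by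
  intro suf
  induction suf with
  | nil => intro nz z; simp
  | cons x rest ih =>
    intro nz z
    have hx : (nz ++ List.replicate z 0 ++ x :: rest).getD (nz.length + z) 0 = x := by
      have := getD_at (nz ++ List.replicate z 0) x rest
      simpa using this
    by_cases h : x = 0
    · subst h
      have hunch : stepA2 (nz ++ List.replicate z 0 ++ 0 :: rest, nz.length) (nz.length + z)
          = (nz ++ List.replicate z 0 ++ 0 :: rest, nz.length) := by
        simp [stepA2, hx]
      have hrw : nz ++ List.replicate z 0 ++ (0 : Int) :: rest
          = nz ++ List.replicate (z + 1) 0 ++ rest := by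
        rw [List.append_assoc, List.append_assoc, replicate_snoc]
      have := ih nz (z + 1)
      simp only [List.length_cons, List.range'_succ, List.foldl_cons]
      rw [hunch, hrw]
      rw [show nz.length + z + 1 = nz.length + (z + 1) by omega]
      rw [this]
      simp only [List.filter_cons, List.countP_cons]
      norm_num
      rw [show z + (rest.countP (fun x => decide (x = 0)) + 1)
          = z + 1 + rest.countP (fun x => decide (x = 0)) by omega]
    · -- x ≠ 0 : swap brings x to position nz.length, a zero (or x itself) to position nz.length + z
      have hstep : stepA2 (nz ++ List.replicate z 0 ++ x :: rest, nz.length) (nz.length + z)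
          = ((nz ++ [x]) ++ List.replicate z 0 ++ rest, nz.length + 1) := by
        cases z with
        | zero =>
          simp [stepA2, h, getD_at, set_at]
        | succ k =>
          have hc : (nz ++ List.replicate (k+1) 0 ++ x :: rest).getD nz.length 0 = 0 := by
            have := getD_at nz (0 : Int) (List.replicate k 0 ++ x :: rest)
            simpa [List.replicate_succ] using this
          simp only [stepA2, hx, ne_eq, h, not_false_iff, if_true, hc]
          rw [show nz ++ List.replicate (k+1) 0 ++ x :: rest
              = nz ++ (0 : Int) :: (List.replicate k 0 ++ x :: rest) by simp [List.replicate_succ]]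
          rw [set_at nz 0 x (List.replicate k 0 ++ x :: rest)]
          rw [show nz ++ x :: (List.replicate k 0 ++ x :: rest)
              = (nz ++ x :: List.replicate k 0) ++ x :: rest by simp]
          rw [show nz.length + (k + 1) = (nz ++ x :: List.replicate k 0).length by simp]
          rw [set_at (nz ++ x :: List.replicate k 0) x 0 rest]
          rw [show nz ++ x :: List.replicate k 0 ++ (0:Int) :: rest
              = nz ++ [x] ++ (List.replicate k 0 ++ (0:Int) :: rest) by simp]
          rw [replicate_snoc]
          simp
      have := ih (nz ++ [x]) z
      simp only [List.length_append, List.length_cons, List.length_nil] at this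
      simp only [List.length_cons, List.range'_succ, List.foldl_cons, hstep]
      rw [show nz.length + z + 1 = nz.length + 1 + z by omega]
      rw [show (nz ++ [x]) ++ List.replicate z 0 ++ rest
          = nz ++ [x] ++ (List.replicate z 0 ++ rest) by simp] at this
      rw [show (nz ++ [x]) ++ List.replicate z 0 ++ rest
          = nz ++ [x] ++ (List.replicate z 0 ++ rest) by simp]
      rw [this]
      simp [List.filter_cons, List.countP_cons, h]

-- characterisation of A
lemma A_eq (arr : List Int) :
    double_and_move arr
      = (dbl arr).filter (· ≠ 0) ++ List.replicate ((dbl arr).countP (· = 0)) 0 := by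
  unfold double_and_move
  have h1 : (List.range (arr.length - 1)).foldl stepA1 arr = dbl arr := by
    have := loop1 arr []
    simpa [List.range_eq_range'] using this
  rw [h1]
  have := loop2 (dbl arr) [] 0
  simpa [List.range_eq_range'] using this

-- characterisation of B's fold: flushing the pending element yields the nonzeros of dbl
lemma B_fold : ∀ (l : List Int) (p : Int) (nz : List Int),
    (let s := l.foldl stepB (nz, some p)
     match s.2 with
     | some q => if q ≠ 0 then s.1 ++ [q] else s.1
     | none => s.1)
      = nz ++ (dbl (p :: l)).filter (· ≠ 0) := by
  intro l
  induction l with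
  | nil =>
    intro p nz
    by_cases hp : p = 0 <;> simp [dbl, List.filter_cons, hp]
  | cons x rest ih =>
    intro p nz
    by_cases hc : p = x ∧ x ≠ 0
    · obtain ⟨hpx, hx⟩ := hc
      have hstep : stepB (nz, some p) x = (nz ++ [2 * p], some 0) := by
        simp [stepB, hpx, hx]
      have hp2 : (2 : Int) * p ≠ 0 := by
        subst hpx; exact mul_ne_zero two_ne_zero hx
      have hd : dbl (p :: x :: rest) = (2 * p) :: dbl (0 :: rest) := by
        simp only [dbl]
        rw [if_pos ⟨hx, hpx⟩]
      simp only [List.foldl_cons, hstep]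
      rw [show (List.foldl stepB (nz ++ [2 * p], some 0) rest) = rest.foldl stepB (nz ++ [2 * p], some 0) from rfl]
      have := ih 0 (nz ++ [2 * p])
      simp only at this ⊢
      rw [this, hd]
      simp [List.filter_cons, hp2]
    · have hd : dbl (p :: x :: rest) = p :: dbl (x :: rest) := by
        simp only [dbl]
        rw [if_neg (by tauto)]
      by_cases hp : p = 0
      · have hstep : stepB (nz, some p) x = (nz, some x) := by
          simp only [stepB]
          rw [if_neg hc]
          simp [hp]
        simp only [List.foldl_cons, hstep]
        have := ih x nz
        simp only at this ⊢
        rw [this, hd]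
        simp [List.filter_cons, hp]
      · have hstep : stepB (nz, some p) x = (nz ++ [p], some x) := by
          simp only [stepB]
          rw [if_neg hc]
          simp [hp]
        simp only [List.foldl_cons, hstep]
        have := ih x (nz ++ [p])
        simp only at this ⊢
        rw [this, hd]
        simp [List.filter_cons, hp]

lemma B_eq (arr : List Int) :
    double_and_move_alt arr
      = (dbl arr).filter (· ≠ 0)
          ++ List.replicate (arr.length - ((dbl arr).filter (· ≠ 0)).length) 0 := by
  cases arr with
  | nil => simp [double_and_move_alt, dbl]
  | cons x rest =>
    unfold double_and_move_alt
    have h0 : stepB ([], none) x = ([], some x) := rfl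
    have hB := B_fold rest x []
    simp only [List.foldl_cons, h0] at *
    rw [hB]
    simp

lemma count_split (l : List Int) :
    l.countP (· = 0) = l.length - (l.filter (· ≠ 0)).length := by
  induction l with
  | nil => rfl
  | cons x rest ih =>
    have hle : (rest.filter (· ≠ 0)).length ≤ rest.length := List.length_filter_le _ _
    by_cases hx : x = 0 <;> simp [List.countP_cons, List.filter_cons, hx, ih] at hle ⊢ <;> omega

-- ===== VERDICT (by name: the statement is the Claim_ definition above) =====
theorem double_and_move_spec : Claim_equal_double_and_move := by
  intro arr _
  show double_and_move arr = double_and_move_alt arr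
  rw [A_eq, B_eq, count_split]
  rw [dbl_length]
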